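-- pv_equiv track=rewrite | github.com/pdh90345/prac_BJ | study_30/bj_27436.py | find_min_i
-- ===== SOURCE A (Python) =====
-- max_num = 9 * pow(10, 18)
--
-- def tri(i):
--     return 6 * (i * (i + 1) // 2) + 1
--
-- def find_min_i(n):
--     left = 0
--     rigth = max_num
--
--     while left < rigth:
--         mid = (left + rigth) // 2
--         if tri(mid) < n:
--             left = mid + 1
--         else:
--             rigth = mid
--     return left + 1  # 1이 0이므로 +1 해준다
-- ===== SOURCE B (Python) =====
-- max_num = 9 * pow(10, 18)
--
-- def isqrt64(m):
--     # digit-by-digit (bit-pair) integer square root, exact for 0 <= m < 2**64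
--     r = 0
--     for k in range(31, -1, -1):
--         c = 2 * r + 1
--         if c * c <= m >> (2 * k):
--             r = c
--         else:
--             r = 2 * r
--     return r
--
-- def find_min_i(n):
--     # closed form: least i >= 0 with 3*i*(i+1)+1 >= n, via integer sqrt of 12n-3
--     if n <= 1:
--         return 1
--     r = isqrt64(12 * n - 3)
--     i = (r - 3) // 6
--     if 3 * i * (i + 1) + 1 < n:
--         i += 1
--     return i + 1
-- ===== Notes on version B (the rewrite author's own statement) =====
-- stated objective: alternative
-- what changed: Replaces the binary search over [0, 9e18] with a closed-form solution of the quadratic 3i(i+1)+1 >= n using a digit-by-digit integer square root of 12n-3 plus a single one-step correction.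
import Mathlib
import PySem

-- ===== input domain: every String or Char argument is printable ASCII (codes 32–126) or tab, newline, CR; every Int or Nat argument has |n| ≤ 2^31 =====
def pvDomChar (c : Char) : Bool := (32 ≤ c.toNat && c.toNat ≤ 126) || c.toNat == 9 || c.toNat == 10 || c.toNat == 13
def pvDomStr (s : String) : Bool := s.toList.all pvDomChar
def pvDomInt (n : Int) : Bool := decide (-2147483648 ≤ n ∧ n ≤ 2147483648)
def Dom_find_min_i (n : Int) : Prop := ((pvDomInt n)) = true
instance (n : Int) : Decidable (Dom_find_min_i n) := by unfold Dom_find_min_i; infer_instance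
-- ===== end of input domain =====

-- B replaces A's binary search over [0, 9e18] by a closed-form solution of tri(i) >= n via a digit-by-digit integer square root (alternative algorithm).


-- ===== PORT A =====
def pvMaxNum : Int := 9 * 10 ^ 18

def tri (i : Int) : Int := 6 * PySem.Int.floordiv (i * (i + 1)) 2 + 1

def bsLoop (n left right : Int) : Int :=
  if h : left < right then
    let mid := PySem.Int.floordiv (left + right) 2
    if tri mid < n then bsLoop n (mid + 1) right else bsLoop n left mid
  else left
termination_by (right - left).toNat
decreasing_by
  · have h1 := PySem.Int.floordiv_two_mid_bounds (le_of_lt h)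
    omega
  · have h1 := PySem.Int.floordiv_two_mid_bounds (le_of_lt h)
    have h2 : PySem.Int.floordiv (left + right) 2 < right := by
      rw [PySem.Int.floordiv_lt_iff_lt_mul (by norm_num)]; omega
    omega

def find_min_i (n : Int) : Int := bsLoop n 0 pvMaxNum + 1

-- ===== PORT B =====
-- Source B's `m >> (2*k)` is ported as floor division by 2^(2*k), which is exactly Python's `>>` on ints
def isqrtLoop (m : Int) : Nat → Int → Int
  | 0, r => r
  | k + 1, r =>
      isqrtLoop m k
        (if (2 * r + 1) * (2 * r + 1) ≤ PySem.Int.floordiv m (2 ^ (2 * k)) then 2 * r + 1 else 2 * r)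

def isqrt64 (m : Int) : Int := isqrtLoop m 32 0

def find_min_i_alt (n : Int) : Int :=
  if n ≤ 1 then 1
  else
    let r := isqrt64 (12 * n - 3)
    let i := PySem.Int.floordiv (r - 3) 6
    let i' := if 3 * i * (i + 1) + 1 < n then i + 1 else i
    i' + 1

-- ===== PRECONDITION & SPEC =====
def Spec_find_min_i (n : Int) (out : Int) : Prop := out = find_min_i_alt n
instance (n : Int) (out : Int) : Decidable (Spec_find_min_i n out) := by unfold Spec_find_min_i; infer_instance

-- ===== CLAIM (what is proved, stated in full; the proofs are below) =====
def Claim_equal_find_min_i : Prop := ∀ (n : Int), Dom_find_min_i n → Spec_find_min_i n (find_min_i n)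

-- ===== LEMMAS AND PROOFS =====

theorem tri_closed (i : Int) : tri i = 3 * i * i + 3 * i + 1 := by
  obtain ⟨k, hk⟩ := (Int.even_mul_succ_self i).two_dvd
  have hk' : i * i + i = 2 * k := by linear_combination hk
  unfold tri
  rw [show i * (i + 1) = i * i + i by ring, PySem.Int.floordiv_eq_ediv_of_pos (by norm_num),
    show (3:Int) * i * i = 3 * (i * i) by ring]
  omega

theorem tri_mono {i j : Int} (hi : 0 ≤ i) (hij : i ≤ j) : tri i ≤ tri j := by
  rw [tri_closed, tri_closed]; nlinarith

-- L is the least index i ≥ 0 with n ≤ tri i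
def IsLeast_tri (n L : Int) : Prop := 0 ≤ L ∧ n ≤ tri L ∧ ∀ j, 0 ≤ j → j < L → tri j < n

theorem least_tri_unique {n L L' : Int} (h : IsLeast_tri n L) (h' : IsLeast_tri n L') : L = L' := by
  obtain ⟨h0, h1, h2⟩ := h
  obtain ⟨h0', h1', h2'⟩ := h'
  by_contra hne
  rcases lt_or_gt_of_ne hne with hlt | hgt
  · exact absurd h1 (not_le.mpr (h2' L h0 hlt))
  · exact absurd h1' (not_le.mpr (h2 L' h0' hgt))

theorem bsLoop_least (n : Int) : ∀ left right : Int, 0 ≤ left → left ≤ right →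
    (∀ j, 0 ≤ j → j < left → tri j < n) → n ≤ tri right →
    IsLeast_tri n (bsLoop n left right) := by
  intro left right
  induction left, right using bsLoop.induct n with
  | case1 left right h mid hc ih =>
    intro h0 hlr hlo hhi
    rw [bsLoop, dif_pos h]
    rw [if_pos hc]
    have hmid := PySem.Int.floordiv_two_mid_bounds (le_of_lt h)
    have h2 : PySem.Int.floordiv (left + right) 2 < right := by
      rw [PySem.Int.floordiv_lt_iff_lt_mul (by norm_num)]; omega
    exact ih (by omega) (by omega)
      (fun j hj hjlt => lt_of_le_of_lt (tri_mono hj (by omega)) hc) hhi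
  | case2 left right h mid hc ih =>
    intro h0 hlr hlo hhi
    rw [bsLoop, dif_pos h]
    rw [if_neg hc]
    have hmid := PySem.Int.floordiv_two_mid_bounds (le_of_lt h)
    exact ih h0 (by omega) hlo (by omega)
  | case3 left right h =>
    intro h0 hlr hlo hhi
    rw [bsLoop, dif_neg h]
    exact ⟨h0, (by omega : left = right) ▸ hhi, hlo⟩

theorem fd_pow (m : Int) (k : Nat) :
    PySem.Int.floordiv m (2 ^ (2 * k)) = m / 2 ^ (2 * k) :=
  PySem.Int.floordiv_eq_ediv_of_pos (by positivity)

theorem sqrt_step (q r : Int) (hq : 0 ≤ q) (h0 : 0 ≤ r)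
    (h1 : r * r ≤ q / 4) (h2 : q / 4 < (r + 1) * (r + 1)) :
    0 ≤ (if (2 * r + 1) * (2 * r + 1) ≤ q then 2 * r + 1 else 2 * r) ∧
    (if (2 * r + 1) * (2 * r + 1) ≤ q then 2 * r + 1 else 2 * r) *
      (if (2 * r + 1) * (2 * r + 1) ≤ q then 2 * r + 1 else 2 * r) ≤ q ∧
    q < ((if (2 * r + 1) * (2 * r + 1) ≤ q then 2 * r + 1 else 2 * r) + 1) *
        ((if (2 * r + 1) * (2 * r + 1) ≤ q then 2 * r + 1 else 2 * r) + 1) := by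
  have ha : 4 * (r * r) ≤ q := by omega
  have hb : q < 4 * ((r + 1) * (r + 1)) := by omega
  split_ifs with hc
  · refine ⟨by omega, hc, ?_⟩
    nlinarith
  · refine ⟨by omega, by nlinarith, by omega⟩

theorem isqrtLoop_correct (m : Int) (hm : 0 ≤ m) :
    ∀ (k : Nat) (r : Int), 0 ≤ r →
      r * r ≤ m / 2 ^ (2 * k) → m / 2 ^ (2 * k) < (r + 1) * (r + 1) →
      0 ≤ isqrtLoop m k r ∧ isqrtLoop m k r * isqrtLoop m k r ≤ m ∧
        m < (isqrtLoop m k r + 1) * (isqrtLoop m k r + 1) := by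
  intro k
  induction k with
  | zero =>
    intro r h0 h1 h2
    simpa [isqrtLoop] using ⟨h0, by simpa using h1, by simpa using h2⟩
  | succ k ih =>
    intro r h0 h1 h2
    have hsplit : m / 2 ^ (2 * (k + 1)) = m / 2 ^ (2 * k) / 4 := by
      rw [Int.ediv_ediv_eq_ediv_mul (by positivity),
        show ((2:Int) ^ (2 * k) * 4) = 2 ^ (2 * (k + 1)) by ring]
    have hq : 0 ≤ m / 2 ^ (2 * k) := Int.ediv_nonneg hm (by positivity)
    rw [hsplit] at h1 h2
    have hs := sqrt_step (m / 2 ^ (2 * k)) r hq h0 h1 h2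
    rw [isqrtLoop, fd_pow]
    exact ih _ hs.1 hs.2.1 hs.2.2

theorem isqrt64_correct (m : Int) (hm : 0 ≤ m) (hub : m < 2 ^ 64) :
    0 ≤ isqrt64 m ∧ isqrt64 m * isqrt64 m ≤ m ∧ m < (isqrt64 m + 1) * (isqrt64 m + 1) := by
  have h0 : m / 2 ^ (2 * 32) = 0 := Int.ediv_eq_zero_of_lt hm (by norm_num at hub ⊢; omega)
  exact isqrtLoop_correct m hm 32 0 le_rfl (by omega) (by omega)

theorem core_least (n r i0 : Int) (h2 : 2 ≤ n) (hr0 : 0 ≤ r)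
    (hr1 : r * r ≤ 12 * n - 3) (hr2 : 12 * n - 3 < (r + 1) * (r + 1))
    (hfd1 : 6 * i0 ≤ r - 3) (hfd2 : r - 3 < 6 * i0 + 6) :
    IsLeast_tri n (if 3 * i0 * (i0 + 1) + 1 < n then i0 + 1 else i0) := by
  have key : ∀ j : Int, (n ≤ tri j ↔ 12 * n - 3 ≤ (6 * j + 3) * (6 * j + 3)) := by
    intro j; rw [tri_closed]; constructor <;> intro h <;> nlinarith
  have hr4 : 4 ≤ r := by nlinarith
  have hi00 : 0 ≤ i0 := by omega
  have h_next : n ≤ tri (i0 + 1) := by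
    rw [key]
    nlinarith [hr2, hfd2, hr4]
  have h_prev : 1 ≤ i0 → tri (i0 - 1) < n := by
    intro h1
    have hlt : (6 * (i0 - 1) + 3) * (6 * (i0 - 1) + 3) < 12 * n - 3 := by
      nlinarith [hr1, hfd1, h1, hr0]
    exact not_le.mp fun hle => absurd ((key _).mp hle) (not_le.mpr hlt)
  have htri0 : tri i0 = 3 * i0 * (i0 + 1) + 1 := by rw [tri_closed]; ring
  split_ifs with hc
  · exact ⟨by omega, h_next,
      fun j hj hjlt => lt_of_le_of_lt (tri_mono hj (by omega)) (htri0 ▸ hc)⟩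
  · refine ⟨hi00, htri0 ▸ not_lt.mp hc, fun j hj hjlt => ?_⟩
    exact lt_of_le_of_lt (tri_mono hj (by omega)) (h_prev (by omega))

theorem find_min_i_eq_alt (n : Int) (h1 : -2147483648 ≤ n) (h2 : n ≤ 2147483648) :
    find_min_i n = find_min_i_alt n := by
  have hA : IsLeast_tri n (bsLoop n 0 pvMaxNum) := by
    refine bsLoop_least n 0 pvMaxNum le_rfl (by norm_num [pvMaxNum])
      (fun j hj hjlt => absurd hjlt (by omega)) ?_
    rw [tri_closed]; norm_num [pvMaxNum]; nlinarith
  by_cases hn : n ≤ 1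
  · have hB0 : IsLeast_tri n 0 := by
      refine ⟨le_rfl, ?_, fun j hj hjlt => absurd hjlt (by omega)⟩
      rw [tri_closed]; omega
    have he := least_tri_unique hA hB0
    simp [find_min_i, find_min_i_alt, hn, he]
  · have hm0 : (0:Int) ≤ 12 * n - 3 := by omega
    have hub : 12 * n - 3 < 2 ^ 64 := by norm_num; omega
    obtain ⟨hr0, hr1, hr2⟩ := isqrt64_correct _ hm0 hub
    have hfd : 6 * PySem.Int.floordiv (isqrt64 (12 * n - 3) - 3) 6 ≤ isqrt64 (12 * n - 3) - 3 ∧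
        isqrt64 (12 * n - 3) - 3 < 6 * PySem.Int.floordiv (isqrt64 (12 * n - 3) - 3) 6 + 6 := by
      rw [PySem.Int.floordiv_eq_ediv_of_pos (by norm_num)]; omega
    have hB := core_least n (isqrt64 (12 * n - 3)) _ (by omega) hr0 hr1 hr2 hfd.1 hfd.2
    have he := least_tri_unique hA hB
    simp only [find_min_i, find_min_i_alt, if_neg hn, he]

-- ===== VERDICT (by name: the statement is the Claim_ definition above) =====
theorem find_min_i_spec : Claim_equal_find_min_i := by
  intro n hd
  have hd' : -2147483648 ≤ n ∧ n ≤ 2147483648 := by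
    simpa [Dom_find_min_i, pvDomInt] using hd
  exact find_min_i_eq_alt n hd'.1 hd'.2
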